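-- pv_equiv track=rewrite | github.com/SickleLeeks/coding.everyday | Leetcode/1725.可以形成最大正方形的矩形数目.py | countGoodRectangles
-- ===== SOURCE A (Python) =====
-- from typing import List
--
-- def countGoodRectangles(rectangles: List[List[int]]) -> int:
--     maxLen, count = 0, 0
--     for i, rectangle in enumerate(rectangles):
--         k = min(rectangle[0], rectangle[1])
--         if k > maxLen:
--             maxLen = k
--             count = 1
--         elif k == maxLen:
--             count += 1
--         else:
--             continue
--     return count
-- ===== SOURCE B (Python) =====
-- def countGoodRectangles(rectangles):
--     mins = [min(r[0], r[1]) for r in rectangles]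
--     m = max([0] + mins)  # 0 baseline: a square side never beats A's initial maxLen of 0
--     return mins.count(m)
-- ===== Notes on version B (the rewrite author's own statement) =====
-- stated objective: simpler
-- what changed: Replaces A's fused single pass with mutable maxLen/count state by three declarative passes: map to min sides, take the max against a 0 baseline, count its occurrences.
import Mathlib
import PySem

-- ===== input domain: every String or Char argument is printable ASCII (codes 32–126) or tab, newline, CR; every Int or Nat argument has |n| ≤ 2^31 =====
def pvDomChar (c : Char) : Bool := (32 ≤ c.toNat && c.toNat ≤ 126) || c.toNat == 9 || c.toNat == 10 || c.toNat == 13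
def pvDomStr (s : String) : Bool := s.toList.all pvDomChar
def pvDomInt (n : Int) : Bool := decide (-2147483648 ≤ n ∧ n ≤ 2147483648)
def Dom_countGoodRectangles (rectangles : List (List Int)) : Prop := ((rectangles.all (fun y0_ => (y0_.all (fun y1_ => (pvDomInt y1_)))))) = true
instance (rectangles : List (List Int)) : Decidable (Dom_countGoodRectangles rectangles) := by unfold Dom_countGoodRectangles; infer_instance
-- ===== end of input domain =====

-- B rewrites A's fused single pass (mutable maxLen/count) as three passes: map to
-- min sides, max against a 0 baseline, count occurrences of the max. Objective: simpler.

-- ===== PORT A =====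
-- one fold carrying the (maxLen, count) state, branches in A's order.
-- rectangle[0]/rectangle[1] via pyGet?; the .getD 0 arm is unreachable under Pre_ (A raises IndexError there).
def countGoodRectangles (rectangles : List (List Int)) : Int :=
  (rectangles.foldl (fun (st : Int × Int) rectangle =>
      let k := min ((PySem.List.pyGet? rectangle 0).getD 0) ((PySem.List.pyGet? rectangle 1).getD 0)
      if k > st.1 then (k, 1)
      else if k = st.1 then (st.1, st.2 + 1)
      else st)
    ((0 : Int), (0 : Int))).2

-- ===== PORT B =====
-- mins = [min(r[0], r[1]) for r in rectangles]; m = max([0] + mins); mins.count(m)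
def countGoodRectangles_alt (rectangles : List (List Int)) : Int :=
  let mins := rectangles.map (fun r =>
      min ((PySem.List.pyGet? r 0).getD 0) ((PySem.List.pyGet? r 1).getD 0))
  let m := (((0 : Int) :: mins).max? ).getD 0   -- max([0] + mins); the list is nonempty so getD is never taken
  PySem.List.count mins m

-- ===== PRECONDITION & SPEC =====
-- Pre_ excludes rectangles with fewer than 2 entries: there A raises IndexError (rectangle[1]).
def Pre_countGoodRectangles (rectangles : List (List Int)) : Prop :=
  ∀ r ∈ rectangles, 2 ≤ r.length
instance (rectangles : List (List Int)) : Decidable (Pre_countGoodRectangles rectangles) := by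
  unfold Pre_countGoodRectangles; infer_instance
def pvWitness_countGoodRectangles : List (List Int) := [[5, 8], [3, 9], [5, 12], [16, 5]]

def Spec_countGoodRectangles (rectangles : List (List Int)) (out : Int) : Prop := out = countGoodRectangles_alt rectangles
instance (rectangles : List (List Int)) (out : Int) : Decidable (Spec_countGoodRectangles rectangles out) := by unfold Spec_countGoodRectangles; infer_instance

-- ===== CLAIM (what is proved, stated in full; the proofs are below) =====
def Claim_equal_countGoodRectangles : Prop := ∀ (rectangles : List (List Int)), Dom_countGoodRectangles rectangles → Pre_countGoodRectangles rectangles → Spec_countGoodRectangles rectangles (countGoodRectangles rectangles)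

-- ===== LEMMAS AND PROOFS =====

-- the accumulator never decreases under repeated max
lemma le_foldl_max (l : List Int) (m : Int) : m ≤ l.foldl max m := by
  induction l generalizing m with
  | nil => exact le_refl m
  | cons x xs ih => exact le_trans (le_max_left m x) (ih (max m x))

-- A's loop, run from any state (m, c), lands on (final max, count of the final max),
-- where the count restarts whenever the max strictly grows.
lemma loopA_eq (f : List Int → Int) :
    ∀ (rs : List (List Int)) (m c : Int),
    rs.foldl (fun (st : Int × Int) r =>
        let k := f r
        if k > st.1 then (k, 1)
        else if k = st.1 then (st.1, st.2 + 1)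
        else st) (m, c)
      = ((rs.map f).foldl max m,
         if (rs.map f).foldl max m = m then c + ((rs.map f).count m : Int)
         else ((rs.map f).count ((rs.map f).foldl max m) : Int)) := by
  intro rs
  induction rs with
  | nil => intro m c; simp
  | cons r rs ih =>
    intro m c
    simp only [List.foldl_cons, List.map_cons]
    by_cases h1 : f r > m
    · rw [if_pos h1, ih (f r) 1]
      have hmax : max m (f r) = f r := max_eq_right (le_of_lt h1)
      have hle : f r ≤ (rs.map f).foldl max (f r) := le_foldl_max _ _
      have hne : (rs.map f).foldl max (f r) ≠ m := by
        intro he; exact absurd (he ▸ hle) (not_le.mpr h1)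
      rw [hmax]
      rw [if_neg hne]
      by_cases h2 : (rs.map f).foldl max (f r) = f r
      · rw [if_pos h2, h2, List.count_cons_self]
        exact congrArg (Prod.mk _) (by push_cast; ring)
      · rw [if_neg h2, List.count_cons_of_ne (fun he => h2 he.symm)]
    · rw [if_neg h1]
      have hmax : max m (f r) = m := max_eq_left (not_lt.mp h1)
      by_cases h2 : f r = m
      · rw [if_pos h2, ih m (c + 1), hmax]
        by_cases h3 : (rs.map f).foldl max m = m
        · rw [if_pos h3, if_pos h3, h2, List.count_cons_self]
          exact congrArg (Prod.mk _) (by push_cast; ring)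
        · rw [if_neg h3, if_neg h3,
              List.count_cons_of_ne (fun he => h3 (he.symm.trans h2))]
      · rw [if_neg h2, ih m c, hmax]
        by_cases h3 : (rs.map f).foldl max m = m
        · rw [if_pos h3, if_pos h3, List.count_cons_of_ne h2]
        · rw [if_neg h3, if_neg h3]
          have hle : m ≤ (rs.map f).foldl max m := le_foldl_max _ _
          have : f r ≠ (rs.map f).foldl max m := by
            intro he
            exact h1 (lt_of_le_of_ne (he ▸ hle) (fun hx => h2 hx.symm))
          rw [List.count_cons_of_ne this]

-- folding max commutes with taking max against a fixed element
lemma max_foldl_max (l : List Int) : ∀ (a x : Int), max a (l.foldl max x) = l.foldl max (max a x) := by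
  induction l with
  | nil => intro a x; rfl
  | cons y ys ih => intro a x; simp only [List.foldl_cons]; rw [ih, max_assoc]

-- List.max? of a nonempty list is the left fold of max over its tail
lemma max?_elim_eq_foldl (l : List Int) : ∀ (a : Int), l.max?.elim a (max a) = l.foldl max a := by
  induction l with
  | nil => intro a; rfl
  | cons x xs ih => intro a; rw [List.max?_cons]; simp only [Option.elim_some]; rw [ih x, max_foldl_max, List.foldl_cons]

-- max([0] + mins) computed by List.max? equals the left fold of max from 0
lemma max?_cons_zero (l : List Int) :
    (((0 : Int) :: l).max?).getD 0 = l.foldl max 0 := by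
  rw [List.max?_cons]
  simp only [Option.getD_some]
  exact max?_elim_eq_foldl l 0

-- ===== VERDICT (by name: the statement is the Claim_ definition above) =====
theorem countGoodRectangles_spec : Claim_equal_countGoodRectangles := by
  intro rectangles _ _
  unfold Spec_countGoodRectangles countGoodRectangles countGoodRectangles_alt
  rw [loopA_eq]
  simp only [max?_cons_zero, PySem.List.count_eq]
  by_cases h : (rectangles.map (fun r : List Int =>
      min ((PySem.List.pyGet? r 0).getD 0) ((PySem.List.pyGet? r 1).getD 0))).foldl max 0 = 0
  · rw [if_pos h, h]; ring
  · rw [if_neg h]
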